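-- pv_equiv track=rewrite | github.com/austral-prog/tp-9-franlu0 | dicts.py | list_inventory
-- ===== SOURCE A (Python) =====
-- def list_inventory(inventory):
--     listtodelete=[]
--     mylist=[]
--     for key, value in inventory.items():
--         if value == 0:
--             listtodelete.append(key)
--     for i in listtodelete:
--         del inventory[i]
--     for key,value in inventory.items():
--         mylist.append((key,value))
--     return mylist
-- ===== SOURCE B (Python) =====
-- def list_inventory(inventory):
--     mylist = []
--     for key, value in list(inventory.items()):
--         if value == 0:
--             del inventory[key]
--         else:
--             mylist.append((key, value))
--     return mylist
-- ===== Notes on version B (the rewrite author's own statement) =====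
-- stated objective: simpler
-- what changed: Replaces A's three sequential passes (collect zero-valued keys, delete them, rebuild the item list) with one pass over a snapshot of the items that deletes zero-valued keys in place and appends the surviving pairs directly.
import Mathlib
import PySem

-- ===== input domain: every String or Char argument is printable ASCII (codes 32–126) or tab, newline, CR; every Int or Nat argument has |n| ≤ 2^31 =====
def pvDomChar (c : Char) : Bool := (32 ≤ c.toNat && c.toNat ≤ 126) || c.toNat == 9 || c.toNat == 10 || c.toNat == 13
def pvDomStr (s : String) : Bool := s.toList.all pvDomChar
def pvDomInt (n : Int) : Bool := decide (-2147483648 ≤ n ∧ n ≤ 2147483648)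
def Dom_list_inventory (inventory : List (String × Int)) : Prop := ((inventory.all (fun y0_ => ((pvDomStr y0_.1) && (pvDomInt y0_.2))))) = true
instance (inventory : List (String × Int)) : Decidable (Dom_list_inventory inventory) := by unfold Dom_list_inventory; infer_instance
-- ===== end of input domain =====

-- B fuses A's three passes (collect zero-valued keys, delete them, rebuild the items) into one
-- pass over a snapshot of the items (objective: simpler); both mutate the dict, return value only is compared.

-- ===== PORT A =====
-- the Python parameter is a dict: marshal the association list through PySem.Dict.ofList
def list_inventory (inventory : List (String × Int)) : List (String × Int) :=
  let d : PySem.Dict String Int := PySem.Dict.ofList inventory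
  let listtodelete : List String :=
    d.items.foldl (fun acc p => if p.2 = 0 then acc ++ [p.1] else acc) []
  let d2 : PySem.Dict String Int := listtodelete.foldl (fun d i => d.erase i) d
  let mylist : List (String × Int) := d2.items.foldl (fun acc p => acc ++ [p]) []
  mylist

-- ===== PORT B =====
-- single pass over a snapshot of the items; state = (the mutated dict, mylist)
def list_inventory_alt (inventory : List (String × Int)) : List (String × Int) :=
  let d : PySem.Dict String Int := PySem.Dict.ofList inventory
  let st : PySem.Dict String Int × List (String × Int) :=
    d.items.foldl
      (fun st p => if p.2 = 0 then (st.1.erase p.1, st.2) else (st.1, st.2 ++ [p]))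
      (d, [])
  st.2

-- ===== PRECONDITION & SPEC =====
def Spec_list_inventory (inventory : List (String × Int)) (out : List (String × Int)) : Prop := out = list_inventory_alt inventory
instance (inventory : List (String × Int)) (out : List (String × Int)) : Decidable (Spec_list_inventory inventory out) := by unfold Spec_list_inventory; infer_instance

-- ===== CLAIM (what is proved, stated in full; the proofs are below) =====
def Claim_equal_list_inventory : Prop := ∀ (inventory : List (String × Int)), Dom_list_inventory inventory → Spec_list_inventory inventory (list_inventory inventory)

-- ===== LEMMAS AND PROOFS =====

-- B's loop: the second component collects exactly the nonzero-valued pairs, whatever the dict state does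
theorem alt_loop_snd (L : List (String × Int)) (d : PySem.Dict String Int)
    (acc : List (String × Int)) :
    (L.foldl
      (fun st p => if p.2 = 0 then (st.1.erase p.1, st.2) else (st.1, st.2 ++ [p]))
      (d, acc)).2 = acc ++ L.filter (fun p => !(p.2 == 0)) := by
  induction L generalizing d acc with
  | nil => simp
  | cons p L ih =>
    by_cases h : p.2 = 0 <;> simp [List.foldl_cons, h, ih]

-- A's first loop collects the keys of the zero-valued pairs
theorem dels_eq (L : List (String × Int)) (acc : List String) :
    L.foldl (fun acc p => if p.2 = 0 then acc ++ [p.1] else acc) acc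
      = acc ++ (L.filter (fun p => p.2 == 0)).map Prod.fst := by
  induction L generalizing acc with
  | nil => simp
  | cons p L ih =>
    by_cases h : p.2 = 0 <;> simp [List.foldl_cons, h, ih]

-- folding erase over a list of keys filters the items by key not in the list
theorem foldl_erase_items (ks : List String) (d : PySem.Dict String Int) :
    (ks.foldl (fun d i => d.erase i) d).items
      = d.items.filter (fun p => !(ks.contains p.1)) := by
  induction ks generalizing d with
  | nil => simp
  | cons k ks ih =>
    rw [List.foldl_cons, ih]
    show ((PySem.Dict.erase d k).items).filter _ = _
    simp only [PySem.Dict.erase, List.filter_filter]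
    apply List.filter_congr
    intro p _
    by_cases h1 : p.1 = k <;> by_cases h2 : p.1 ∈ ks <;> simp [h1, h2]

theorem list_inventory_eq_filter (inventory : List (String × Int)) :
    list_inventory inventory
      = (PySem.Dict.ofList inventory).items.filter (fun p => !(p.2 == 0)) := by
  unfold list_inventory
  simp only [dels_eq, List.nil_append, PySem.List.foldl_append_singleton_eq_map,
    List.map_id_fun', foldl_erase_items]
  have hnd : ((PySem.Dict.ofList inventory).items.map Prod.fst).Nodup := by
    have := PySem.Dict.nodup_keys_ofList (κ := String) (ν := Int) inventory
    simpa [PySem.Dict.keys] using this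
  apply List.filter_congr
  intro p hp
  by_cases hz : p.2 = 0
  · have hm : p.1 ∈ ((PySem.Dict.ofList inventory).items.filter
        (fun q => q.2 == 0)).map Prod.fst :=
      List.mem_map_of_mem (List.mem_filter.2 ⟨hp, by simp [hz]⟩)
    simp [hz, hm]
  · have hm : p.1 ∉ ((PySem.Dict.ofList inventory).items.filter
        (fun q => q.2 == 0)).map Prod.fst := by
      intro hmem
      obtain ⟨q, hq, hq1⟩ := List.mem_map.1 hmem
      obtain ⟨hqL, hqz⟩ := List.mem_filter.1 hq
      have : q = p := List.inj_on_of_nodup_map hnd hqL hp hq1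
      exact hz (by simpa [this] using hqz)
    simp [hz, hm]

-- ===== VERDICT (by name: the statement is the Claim_ definition above) =====
theorem list_inventory_spec : Claim_equal_list_inventory := by
  intro inventory _
  unfold Spec_list_inventory list_inventory_alt
  rw [alt_loop_snd, list_inventory_eq_filter]
  simp
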